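-- pv_equiv track=rewrite | github.com/exuding/Kaggle | Fraud-Detection-master/util/computeWoeAndIv.py | valueToGroup
-- ===== SOURCE A (Python) =====
-- def valueToGroup(x, cutoffs):  # 需要转化到分组的值，cutoffs各组的启始值
--     # 切分点从小到大排序
--     cutoffs = sorted(cutoffs)
--     num_groups = len(cutoffs)
--     # 异常情况，小于第一组的起始值，这里直接放到第一组
--     # 异常值建议在分组之前处理妥善
--     if x < cutoffs[0]:
--         return 'group1'
--     for i in range(1, num_groups):
--         if cutoffs[i - 1] <= x < cutoffs[i]:
--             return 'group{}'.format(i)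
--     # 最后一组，也可能会包含很大的异常值
--     return 'group{}'.format(num_groups)
-- ===== SOURCE B (Python) =====
-- def valueToGroup(x, cutoffs):  # maps value to its bin: group i iff cutoffs[i-1] <= x < cutoffs[i] (sorted order)
--     # No sort needed: the group index for x >= min(cutoffs) is simply the
--     # number of cutoffs that are <= x; values below every cutoff go to group 1.
--     if x < min(cutoffs):
--         return 'group1'
--     return 'group{}'.format(sum(1 for c in cutoffs if c <= x))
-- ===== Notes on version B (the rewrite author's own statement) =====
-- stated objective: faster
-- what changed: Replaces sort + linear interval scan with a single unsorted counting pass: the group index for x >= min(cutoffs) is the number of cutoffs <= x (min() guard keeps values below all cutoffs in group 1), so no sorting and no indexed window comparisons.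
import Mathlib
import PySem

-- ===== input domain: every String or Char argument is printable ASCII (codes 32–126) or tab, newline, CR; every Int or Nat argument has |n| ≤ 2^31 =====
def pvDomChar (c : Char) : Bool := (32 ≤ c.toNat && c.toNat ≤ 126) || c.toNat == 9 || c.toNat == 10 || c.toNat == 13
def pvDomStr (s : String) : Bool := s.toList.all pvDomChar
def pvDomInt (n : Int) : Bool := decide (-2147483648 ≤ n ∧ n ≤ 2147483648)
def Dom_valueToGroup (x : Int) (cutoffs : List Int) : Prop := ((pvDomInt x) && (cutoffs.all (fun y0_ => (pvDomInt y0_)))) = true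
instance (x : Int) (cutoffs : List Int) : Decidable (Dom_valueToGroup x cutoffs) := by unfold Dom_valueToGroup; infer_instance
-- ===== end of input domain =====

-- B drops the sort and the indexed interval scan: the group index is the count of cutoffs ≤ x,
-- computed in one unsorted pass (measured faster); Pre_ excludes the empty cutoff list, on which both raise.

-- ===== PORT A =====
def valueToGroup (x : Int) (cutoffs : List Int) : String :=
  let cs := PySem.List.sorted cutoffs (fun v => v) false
  let numGroups : Int := cs.length
  if x < PySem.List.pyGetD cs 0 0 then "group1"
  else
    match (PySem.List.pyRange 1 numGroups 1).find?
        (fun i => decide (PySem.List.pyGetD cs (i - 1) 0 ≤ x) && decide (x < PySem.List.pyGetD cs i 0)) with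
    | some i => "group" ++ PySem.Int.toStr i
    | none => "group" ++ PySem.Int.toStr numGroups

-- ===== PORT B =====
def valueToGroup_alt (x : Int) (cutoffs : List Int) : String :=
  if x < (PySem.List.min? cutoffs (fun v => v)).getD 0 then "group1"
  else "group" ++ PySem.Int.toStr (cutoffs.countP (fun cs => decide (cs ≤ x)))

-- ===== PRECONDITION & SPEC =====
-- Python A raises IndexError (and B's min() ValueError) on an empty cutoff list.
def Pre_valueToGroup (x : Int) (cutoffs : List Int) : Prop := cutoffs ≠ []
instance (x : Int) (cutoffs : List Int) : Decidable (Pre_valueToGroup x cutoffs) := by unfold Pre_valueToGroup; infer_instance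
def pvWitness_valueToGroup : Int × List Int := (3, [1, 4, 2])

def Spec_valueToGroup (x : Int) (cutoffs : List Int) (out : String) : Prop := out = valueToGroup_alt x cutoffs
instance (x : Int) (cutoffs : List Int) (out : String) : Decidable (Spec_valueToGroup x cutoffs out) := by unfold Spec_valueToGroup; infer_instance

-- ===== CLAIM (what is proved, stated in full; the proofs are below) =====
def Claim_equal_valueToGroup : Prop := ∀ (x : Int) (cutoffs : List Int), Dom_valueToGroup x cutoffs → Pre_valueToGroup x cutoffs → Spec_valueToGroup x cutoffs (valueToGroup x cutoffs)

-- ===== LEMMAS AND PROOFS =====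

-- On a ≤-sorted list, cs[j] ≤ x exactly for the first (countP (· ≤ x)) positions.
theorem countP_sorted_char (cs : List Int) (x : Int) (h : cs.Pairwise (· ≤ ·))
    (j : Nat) (hj : j < cs.length) :
    (cs[j] ≤ x ↔ j < cs.countP (fun v => decide (v ≤ x))) := by
  induction cs generalizing j with
  | nil => simp at hj
  | cons a t ih =>
    rcases List.pairwise_cons.mp h with ⟨ha, ht⟩
    by_cases hax : a ≤ x
    · cases j with
      | zero => simp [hax]
      | succ m =>
        simp only [List.length_cons] at hj
        have := ih ht m (by omega)
        simp [hax]
        simpa using this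
    · have h0 : t.countP (fun v => decide (v ≤ x)) = 0 := by
        apply List.countP_eq_zero.mpr
        intro v hv
        simp only [decide_eq_true_eq]
        exact fun hvx => hax (le_trans (ha v hv) hvx)
      cases j with
      | zero => simp [hax, h0]
      | succ m =>
        simp only [List.length_cons] at hj
        have h2 : ¬ t[m] ≤ x := fun hvx => hax (le_trans (ha _ (List.getElem_mem _)) hvx)
        simp [hax, h0, h2]

-- ===== VERDICT (by name: the statement is the Claim_ definition above) =====
theorem valueToGroup_spec : Claim_equal_valueToGroup := by
  intro x cutoffs _ hpre
  simp only [Spec_valueToGroup, valueToGroup, valueToGroup_alt]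
  set cs := PySem.List.sorted cutoffs (fun v => v) false with hc
  have hperm : cs.Perm cutoffs := PySem.List.sorted_perm cutoffs (fun v => v) false
  have hpair : cs.Pairwise (fun a b => (fun v => v) a ≤ (fun v => v) b) :=
    PySem.List.sorted_pairwise cutoffs (fun v => v)
  have hpair' : cs.Pairwise (· ≤ ·) := hpair
  have hcne : cs ≠ [] := by
    intro h
    exact hpre (List.Perm.eq_nil (by rw [h] at hperm; exact hperm.symm))
  have hclen : 0 < cs.length := List.length_pos_iff.mpr hcne
  -- min? of cutoffs is cs[0]
  obtain ⟨m, hm⟩ : ∃ m, PySem.List.min? cutoffs (fun v => v) = some m := by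
    cases hmin : PySem.List.min? cutoffs (fun v => v) with
    | none => exact absurd ((PySem.List.min?_eq_none_iff cutoffs (fun v => v)).mp hmin) hpre
    | some m => exact ⟨m, rfl⟩
  have hmmem : m ∈ cs := hperm.mem_iff.mpr (PySem.List.min?_mem hm)
  have hmmin : ∀ y ∈ cs, m ≤ y := fun y hy => PySem.List.min?_isMin hm y (hperm.mem_iff.mp hy)
  have hm0 : m = cs[0] := by
    have h1 : m ≤ cs[0] := hmmin _ (List.getElem_mem hclen)
    have h2 : cs[0] ≤ m := by
      obtain ⟨j, hj, hjm⟩ := List.getElem_of_mem hmmem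
      rcases Nat.eq_zero_or_pos j with hj0 | hj0
      · subst hj0; omega
      · have := (List.pairwise_iff_getElem.mp hpair') 0 j hclen hj hj0
        omega
    omega
  have hget0 : PySem.List.pyGetD cs 0 0 = cs[0] := by
    rw [PySem.List.pyGetD_zero]
    exact List.getD_eq_getElem cs 0 hclen
  rw [hm, hget0]
  simp only [Option.getD_some, ← hm0]
  by_cases hx1 : x < m
  · simp [hx1]
  · simp only [if_neg hx1]
    -- k = number of cutoffs ≤ x
    set k : Nat := cutoffs.countP (fun v => decide (v ≤ x)) with hk
    have hkc : cs.countP (fun v => decide (v ≤ x)) = k := hperm.countP_eq _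
    have hchar : ∀ (j : Nat) (hj : j < cs.length), (cs[j] ≤ x ↔ j < k) := by
      intro j hj
      rw [← hkc]; exact countP_sorted_char cs x hpair' j hj
    have hk1 : 1 ≤ k := by
      have := (hchar 0 hclen).mp (by rw [← hm0]; omega)
      omega
    have hkn : k ≤ cs.length := hkc ▸ List.countP_le_length
    have hgetD : ∀ (j : Nat) (_hj : j < cs.length), PySem.List.pyGetD cs (j : Int) 0 = cs[j] := by
      intro j hj
      rw [PySem.List.pyGetD_natCast]
      exact List.getD_eq_getElem cs 0 hj
    -- the loop predicate, characterised
    have hpred : ∀ i ∈ PySem.List.pyRange 1 (cs.length : Int) 1,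
        ((decide (PySem.List.pyGetD cs (i - 1) 0 ≤ x) && decide (x < PySem.List.pyGetD cs i 0)) = true
          ↔ i = (k : Int) ∧ k < cs.length) := by
      intro i hi
      have hib := PySem.List.mem_pyRange_one.mp hi
      obtain ⟨j, rfl⟩ : ∃ j : Nat, i = (j : Int) := ⟨i.toNat, by omega⟩
      have hj1 : 1 ≤ j := by omega
      have hjlt : j < cs.length := by omega
      have hjlt1 : j - 1 < cs.length := by omega
      have hi1 : (j : Int) - 1 = ((j - 1 : Nat) : Int) := by omega
      rw [hi1, hgetD _ hjlt1, hgetD _ hjlt]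
      simp only [Bool.and_eq_true, decide_eq_true_eq]
      constructor
      · rintro ⟨h1, h2⟩
        have ha := (hchar _ hjlt1).mp h1
        have hb : ¬ (j < k) := fun hlt => absurd ((hchar _ hjlt).mpr hlt) (not_le.mpr h2)
        constructor <;> omega
      · rintro ⟨hik, hklen⟩
        have hik' : j = k := by omega
        refine ⟨(hchar _ hjlt1).mpr (by omega), ?_⟩
        have hnb : ¬ cs[j] ≤ x := fun hle => by have := (hchar _ hjlt).mp hle; omega
        omega
    by_cases hkcase : k < cs.length
    · -- find? returns some k
      have hsplit : PySem.List.pyRange 1 (cs.length : Int) 1 =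
          PySem.List.pyRange 1 (k : Int) 1 ++ PySem.List.pyRange (k : Int) (cs.length : Int) 1 := by
        exact PySem.List.pyRange_one_append 1 (k : Int) (cs.length : Int) (by omega) (by omega)
      have hfind : (PySem.List.pyRange 1 (cs.length : Int) 1).find?
          (fun i => decide (PySem.List.pyGetD cs (i - 1) 0 ≤ x) && decide (x < PySem.List.pyGetD cs i 0))
          = some (k : Int) := by
        rw [hsplit, List.find?_append]
        have hnone : (PySem.List.pyRange 1 (k : Int) 1).find?
            (fun i => decide (PySem.List.pyGetD cs (i - 1) 0 ≤ x) && decide (x < PySem.List.pyGetD cs i 0)) = none := by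
          apply List.find?_eq_none.mpr
          intro i hi
          have hib := PySem.List.mem_pyRange_one.mp hi
          have hi' : i ∈ PySem.List.pyRange 1 (cs.length : Int) 1 :=
            PySem.List.mem_pyRange_one.mpr ⟨hib.1, by omega⟩
          intro hcontra
          have := (hpred i hi').mp hcontra
          omega
        rw [hnone, Option.none_or]
        have hcons : PySem.List.pyRange (k : Int) (cs.length : Int) 1 =
            (k : Int) :: PySem.List.pyRange ((k : Int) + 1) (cs.length : Int) 1 :=
          PySem.List.pyRange_one_cons (by omega)
        rw [hcons, List.find?_cons_of_pos]
        exact (hpred (k : Int) (PySem.List.mem_pyRange_one.mpr ⟨by omega, by omega⟩)).mpr ⟨rfl, hkcase⟩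
      rw [hfind]
    · -- k = cs.length: find? returns none
      have hkeq : k = cs.length := by omega
      have hfind : (PySem.List.pyRange 1 (cs.length : Int) 1).find?
          (fun i => decide (PySem.List.pyGetD cs (i - 1) 0 ≤ x) && decide (x < PySem.List.pyGetD cs i 0))
          = none := by
        apply List.find?_eq_none.mpr
        intro i hi hcontra
        have := (hpred i hi).mp hcontra
        omega
      rw [hfind]
      simp [hkeq]
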